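-- pv_equiv track=rewrite | github.com/kimdahee7/CodingTest_Python | 백준/Silver/20546. 🐜 기적의 매매법 🐜/🐜 기적의 매매법 🐜.py | Sung
-- ===== SOURCE A (Python) =====
-- def Sung(M,l):
--   count = 0
--   a = 0
--   d = 0
--   for i in range(1,len(l)):
--     if l[i-1] > l[i]:
--       d +=1
--       a = 0
--     elif l[i-1] < l[i]:
--       d = 0
--       a +=1
--     else:
--       a = 0
--       d = 0
--     if d >= 3:
--       count += M//l[i]
--       M -= l[i]*(M//l[i])
--     if a >= 3:
--       M += count*l[i]
--       count = 0
--   return count * l[len(l)-1] + M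
-- ===== SOURCE B (Python) =====
-- def Sung(M, l):
--     # Two staged passes: first extract the trade events (buy/sell with price),
--     # then replay the event list against the cash/share state.
--     events = []
--     for i in range(3, len(l)):
--         if l[i-3] > l[i-2] > l[i-1] > l[i]:
--             events.append((True, l[i]))   # buy day
--         elif l[i-3] < l[i-2] < l[i-1] < l[i]:
--             events.append((False, l[i]))  # sell day
--     count = 0
--     for is_buy, p in events:
--         if is_buy:
--             q = M // p
--             count += q
--             M -= p * q
--         else:
--             M += count * p
--             count = 0
--     return count * l[-1] + M
-- ===== Notes on version B (the rewrite author's own statement) =====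
-- stated objective: alternative
-- what changed: B splits the single stateful pass into two staged passes: it first extracts a list of buy/sell events by testing each four-price window (no run-length counters), then replays that event list against the (cash, shares) state.
import Mathlib
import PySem

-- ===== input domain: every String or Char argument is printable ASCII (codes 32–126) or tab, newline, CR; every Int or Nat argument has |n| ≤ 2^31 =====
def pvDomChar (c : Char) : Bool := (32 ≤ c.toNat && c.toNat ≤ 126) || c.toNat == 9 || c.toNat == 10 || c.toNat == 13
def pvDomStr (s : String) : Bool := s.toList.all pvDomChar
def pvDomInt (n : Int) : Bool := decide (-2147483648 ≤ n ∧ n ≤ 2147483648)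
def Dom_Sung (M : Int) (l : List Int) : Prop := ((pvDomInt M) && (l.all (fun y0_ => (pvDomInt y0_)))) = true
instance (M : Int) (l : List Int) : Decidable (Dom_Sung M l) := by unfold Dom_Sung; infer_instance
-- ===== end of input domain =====

-- B replaces A's single stateful pass with two staged passes — window-based
-- event extraction, then event replay — trading the run-length counters for an
-- intermediate event list (alternative decomposition; same O(n) cost).


-- ===== PORT A =====
-- one iteration of A's loop; state (count, M, a, d); i ranges over 1 .. len-1 so getD is exact
def SungStep (l : List Int) (st : Int × Int × Int × Int) (i : Nat) : Int × Int × Int × Int :=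
  match st with
  | (count, M, a, d) =>
    let prev := l.getD (i-1) 0
    let cur := l.getD i 0
    let ad : Int × Int := if prev > cur then (0, d+1)
      else if prev < cur then (a+1, 0) else (0, 0)
    let a := ad.1
    let d := ad.2
    let cm : Int × Int := if 3 ≤ d then
        (count + PySem.Int.floordiv M cur, M - cur * PySem.Int.floordiv M cur)
      else (count, M)
    let count := cm.1
    let M := cm.2
    let cm2 : Int × Int := if 3 ≤ a then (0, M + count * cur) else (count, M)
    (cm2.1, cm2.2, a, d)

def Sung (M : Int) (l : List Int) : Int :=
  let st := (List.range' 1 (l.length - 1)).foldl (SungStep l) (0, M, 0, 0)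
  st.1 * l.getD (l.length - 1) 0 + st.2.1

-- ===== PORT B =====
-- stage 1 of B: one iteration of the event-extraction loop over i in range(3, len(l))
def SungAltEventStep (l : List Int) (ev : List (Bool × Int)) (i : Nat) : List (Bool × Int) :=
  if l.getD (i-3) 0 > l.getD (i-2) 0 ∧ l.getD (i-2) 0 > l.getD (i-1) 0 ∧ l.getD (i-1) 0 > l.getD i 0 then
    ev ++ [(true, l.getD i 0)]
  else if l.getD (i-3) 0 < l.getD (i-2) 0 ∧ l.getD (i-2) 0 < l.getD (i-1) 0 ∧ l.getD (i-1) 0 < l.getD i 0 then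
    ev ++ [(false, l.getD i 0)]
  else ev

-- stage 2 of B: replay one (is_buy, price) event against the (count, M) state
def SungAltTrade (st : Int × Int) (e : Bool × Int) : Int × Int :=
  match st, e with
  | (count, M), (isBuy, p) =>
    if isBuy then
      let q := PySem.Int.floordiv M p
      (count + q, M - p * q)
    else (0, M + count * p)

def Sung_alt (M : Int) (l : List Int) : Int :=
  let events := (List.range' 3 (l.length - 3)).foldl (SungAltEventStep l) []
  let st := events.foldl SungAltTrade (0, M)
  st.1 * l.getD (l.length - 1) 0 + st.2

-- ===== PRECONDITION & SPEC =====
-- Pre_ excludes exactly the inputs where Python A raises: the empty list (IndexError on l[len(l)-1])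
-- and lists where a strictly decreasing four-price window ends at a zero price (ZeroDivisionError on M//l[i]).
def Pre_Sung (M : Int) (l : List Int) : Prop :=
  l ≠ [] ∧ ∀ i < l.length, (3 ≤ i ∧ l.getD (i-3) 0 > l.getD (i-2) 0 ∧ l.getD (i-2) 0 > l.getD (i-1) 0 ∧ l.getD (i-1) 0 > l.getD i 0) → l.getD i 0 ≠ 0
instance (M : Int) (l : List Int) : Decidable (Pre_Sung M l) := by unfold Pre_Sung; infer_instance

def pvWitness_Sung : Int × List Int := (14, [7, 6, 5, 4, 3, 10])

def Spec_Sung (M : Int) (l : List Int) (out : Int) : Prop := out = Sung_alt M l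
instance (M : Int) (l : List Int) (out : Int) : Decidable (Spec_Sung M l out) := by unfold Spec_Sung; infer_instance

-- ===== CLAIM (what is proved, stated in full; the proofs are below) =====
def Claim_equal_Sung : Prop := ∀ (M : Int) (l : List Int), Dom_Sung M l → Pre_Sung M l → Spec_Sung M l (Sung M l)

-- ===== LEMMAS AND PROOFS =====

-- run length of strict decreases ending at index i (A's counter d after processing i)
def decRun (l : List Int) : Nat → Int
  | 0 => 0
  | i+1 => if l.getD i 0 > l.getD (i+1) 0 then decRun l i + 1 else 0

-- run length of strict increases ending at index i (A's counter a after processing i)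
def incRun (l : List Int) : Nat → Int
  | 0 => 0
  | i+1 => if l.getD i 0 < l.getD (i+1) 0 then incRun l i + 1 else 0

lemma decRun_bounds (l : List Int) (i : Nat) : 0 ≤ decRun l i ∧ decRun l i ≤ (i : Int) := by
  induction i with
  | zero => simp [decRun]
  | succ j ih =>
    rw [decRun]
    by_cases h : l.getD j 0 > l.getD (j+1) 0
    · rw [if_pos h]; omega
    · rw [if_neg h]; omega

lemma incRun_bounds (l : List Int) (i : Nat) : 0 ≤ incRun l i ∧ incRun l i ≤ (i : Int) := by
  induction i with
  | zero => simp [incRun]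
  | succ j ih =>
    rw [incRun]
    by_cases h : l.getD j 0 < l.getD (j+1) 0
    · rw [if_pos h]; omega
    · rw [if_neg h]; omega

lemma decRun_ge3 (l : List Int) (i : Nat) :
    3 ≤ decRun l i ↔
      (3 ≤ i ∧ l.getD (i-3) 0 > l.getD (i-2) 0 ∧ l.getD (i-2) 0 > l.getD (i-1) 0 ∧ l.getD (i-1) 0 > l.getD i 0) := by
  match i with
  | 0 => simp [decRun]
  | 1 => have := decRun_bounds l 1; omega
  | 2 => have := decRun_bounds l 2; omega
  | (j+3) =>
    have h0 := decRun_bounds l j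
    have e3 : j + 3 - 3 = j := by omega
    have e2 : j + 3 - 2 = j + 1 := by omega
    have e1 : j + 3 - 1 = j + 2 := by omega
    rw [e3, e2, e1, decRun]
    by_cases h1 : l.getD (j+2) 0 > l.getD (j+3) 0
    · rw [if_pos h1, decRun]
      by_cases h2 : l.getD (j+1) 0 > l.getD (j+2) 0
      · rw [if_pos h2, decRun]
        by_cases h3 : l.getD j 0 > l.getD (j+1) 0
        · rw [if_pos h3]
          constructor
          · intro _; exact ⟨by omega, h3, h2, h1⟩
          · intro _; omega
        · rw [if_neg h3]
          constructor
          · intro h; omega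
          · rintro ⟨-, h3', -, -⟩; exact absurd h3' h3
      · rw [if_neg h2]
        constructor
        · intro h; omega
        · rintro ⟨-, -, h2', -⟩; exact absurd h2' h2
    · rw [if_neg h1]
      constructor
      · intro h; omega
      · rintro ⟨-, -, -, h1'⟩; exact absurd h1' h1

lemma incRun_ge3 (l : List Int) (i : Nat) :
    3 ≤ incRun l i ↔
      (3 ≤ i ∧ l.getD (i-3) 0 < l.getD (i-2) 0 ∧ l.getD (i-2) 0 < l.getD (i-1) 0 ∧ l.getD (i-1) 0 < l.getD i 0) := by
  match i with
  | 0 => simp [incRun]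
  | 1 => have := incRun_bounds l 1; omega
  | 2 => have := incRun_bounds l 2; omega
  | (j+3) =>
    have h0 := incRun_bounds l j
    have e3 : j + 3 - 3 = j := by omega
    have e2 : j + 3 - 2 = j + 1 := by omega
    have e1 : j + 3 - 1 = j + 2 := by omega
    rw [e3, e2, e1, incRun]
    by_cases h1 : l.getD (j+2) 0 < l.getD (j+3) 0
    · rw [if_pos h1, incRun]
      by_cases h2 : l.getD (j+1) 0 < l.getD (j+2) 0
      · rw [if_pos h2, incRun]
        by_cases h3 : l.getD j 0 < l.getD (j+1) 0
        · rw [if_pos h3]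
          constructor
          · intro _; exact ⟨by omega, h3, h2, h1⟩
          · intro _; omega
        · rw [if_neg h3]
          constructor
          · intro h; omega
          · rintro ⟨-, h3', -, -⟩; exact absurd h3' h3
      · rw [if_neg h2]
        constructor
        · intro h; omega
        · rintro ⟨-, -, h2', -⟩; exact absurd h2' h2
    · rw [if_neg h1]
      constructor
      · intro h; omega
      · rintro ⟨-, -, -, h1'⟩; exact absurd h1' h1

-- loop invariant: after A has processed indices 1..m, its (count, M) equal the replay of
-- the events B extracts from indices 3..m, and its counters a, d equal the run lengths
lemma loop_inv (l : List Int) (M : Int) (m : Nat) :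
    (List.range' 1 m).foldl (SungStep l) (0, M, 0, 0) =
      ((((List.range' 3 (m-2)).foldl (SungAltEventStep l) []).foldl SungAltTrade (0, M)).1,
       (((List.range' 3 (m-2)).foldl (SungAltEventStep l) []).foldl SungAltTrade (0, M)).2,
       incRun l m, decRun l m) := by
  induction m with
  | zero => simp [incRun, decRun]
  | succ m ih =>
    rw [List.range'_1_concat, List.foldl_append, ih]
    set E := (List.range' 3 (m-2)).foldl (SungAltEventStep l) [] with hE
    simp only [List.foldl_cons, List.foldl_nil]
    have h1m : 1 + m = m + 1 := by omega
    rw [h1m]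
    -- the event list after processing index m+1
    have hEv : (List.range' 3 (m+1-2)).foldl (SungAltEventStep l) [] = SungAltEventStep l E (m+1) ∨
        (m + 1 < 3 ∧ (List.range' 3 (m+1-2)).foldl (SungAltEventStep l) [] = E) := by
      by_cases hm : 2 ≤ m
      · left
        have : m + 1 - 2 = (m - 2) + 1 := by omega
        rw [this, List.range'_1_concat, List.foldl_append, ← hE]
        have : 3 + (m - 2) = m + 1 := by omega
        rw [this]
        simp
      · right
        have : m + 1 - 2 = 0 := by omega
        have : m - 2 = 0 := by omega
        constructor
        · omega
        · have e1 : m + 1 - 2 = 0 := by omega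
          have e2 : m - 2 = 0 := by omega
          rw [e1, hE, e2]
    have hd := decRun_ge3 l (m+1)
    have ha := incRun_ge3 l (m+1)
    have hdb := decRun_bounds l m
    have hab := incRun_bounds l m
    simp only [Nat.add_sub_cancel] at hd ha
    rcases lt_trichotomy (l.getD m 0) (l.getD (m+1) 0) with hlt | heq | hgt
    · -- strict increase at m+1: d resets to 0, a becomes incRun l m + 1
      have hai : incRun l (m+1) = incRun l m + 1 := by rw [incRun, if_pos hlt]
      have hdi : decRun l (m+1) = 0 := by rw [decRun, if_neg (by omega)]
      have hW : ¬(l.getD (m+1-3) 0 > l.getD (m+1-2) 0 ∧ l.getD (m+1-2) 0 > l.getD (m+1-1) 0 ∧ l.getD (m+1-1) 0 > l.getD (m+1) 0) := by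
        have e1 : m + 1 - 1 = m := by omega
        rw [e1]; rintro ⟨-, -, hx⟩; omega
      by_cases hsell : 3 ≤ incRun l m + 1
      · -- a ≥ 3: sell event
        have hm3 : 3 ≤ m + 1 := by omega
        have hWin : l.getD (m+1-3) 0 < l.getD (m+1-2) 0 ∧ l.getD (m+1-2) 0 < l.getD (m+1-1) 0 ∧ l.getD (m+1-1) 0 < l.getD (m+1) 0 := by
          have := (ha.mp (by omega : 3 ≤ incRun l (m+1)))
          exact ⟨this.2.1, this.2.2.1, this.2.2.2⟩
        rcases hEv with hEv | ⟨hlt3, _⟩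
        · rw [hEv]
          simp only [SungAltEventStep, if_neg hW, if_pos hWin, List.foldl_append,
            List.foldl_cons, List.foldl_nil]
          simp only [SungStep, SungAltTrade, Nat.add_sub_cancel,
            if_neg (by omega : ¬ l.getD m 0 > l.getD (m+1) 0), if_pos hlt,
            if_neg (by omega : ¬ (3:Int) ≤ 0), if_pos hsell, hai, hdi]
          simp
        · omega
      · -- a < 3: no event, no trade
        have hWa : ¬(l.getD (m+1-3) 0 < l.getD (m+1-2) 0 ∧ l.getD (m+1-2) 0 < l.getD (m+1-1) 0 ∧ l.getD (m+1-1) 0 < l.getD (m+1) 0) := by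
          intro hx
          rcases Nat.lt_or_ge (m+1) 3 with h3 | h3
          · have e : m + 1 - 3 = m + 1 - 2 := by omega
            rw [e] at hx
            exact absurd hx.1 (lt_irrefl _)
          · have e1 : m + 1 - 1 = m := by omega
            rw [e1] at hx
            exact hsell (by rw [← hai]; exact ha.mpr ⟨h3, hx⟩)
        rcases hEv with hEv | ⟨hlt3, hEv⟩ <;>
        · rw [hEv]
          first
          | (simp only [SungAltEventStep, if_neg hW, if_neg hWa]
             simp only [SungStep, Nat.add_sub_cancel,
               if_neg (by omega : ¬ l.getD m 0 > l.getD (m+1) 0), if_pos hlt,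
               if_neg (by omega : ¬ (3:Int) ≤ 0), if_neg hsell, hai, hdi])
          | (simp only [SungStep, Nat.add_sub_cancel,
               if_neg (by omega : ¬ l.getD m 0 > l.getD (m+1) 0), if_pos hlt,
               if_neg (by omega : ¬ (3:Int) ≤ 0), if_neg hsell, hai, hdi])
    · -- equal prices: both counters reset, no event
      have hai : incRun l (m+1) = 0 := by rw [incRun, if_neg (by omega)]
      have hdi : decRun l (m+1) = 0 := by rw [decRun, if_neg (by omega)]
      have e1 : m + 1 - 1 = m := by omega
      have hW : ¬(l.getD (m+1-3) 0 > l.getD (m+1-2) 0 ∧ l.getD (m+1-2) 0 > l.getD (m+1-1) 0 ∧ l.getD (m+1-1) 0 > l.getD (m+1) 0) := by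
        rw [e1]; rintro ⟨-, -, hx⟩; omega
      have hWa : ¬(l.getD (m+1-3) 0 < l.getD (m+1-2) 0 ∧ l.getD (m+1-2) 0 < l.getD (m+1-1) 0 ∧ l.getD (m+1-1) 0 < l.getD (m+1) 0) := by
        rw [e1]; rintro ⟨-, -, hx⟩; omega
      rcases hEv with hEv | ⟨hlt3, hEv⟩ <;>
      · rw [hEv]
        first
        | (simp only [SungAltEventStep, if_neg hW, if_neg hWa]
           simp only [SungStep, Nat.add_sub_cancel,
             if_neg (by omega : ¬ l.getD m 0 > l.getD (m+1) 0),
             if_neg (by omega : ¬ l.getD m 0 < l.getD (m+1) 0),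
             if_neg (by omega : ¬ (3:Int) ≤ 0), hai, hdi])
        | (simp only [SungStep, Nat.add_sub_cancel,
             if_neg (by omega : ¬ l.getD m 0 > l.getD (m+1) 0),
             if_neg (by omega : ¬ l.getD m 0 < l.getD (m+1) 0),
             if_neg (by omega : ¬ (3:Int) ≤ 0), hai, hdi])
    · -- strict decrease at m+1: a resets to 0, d becomes decRun l m + 1
      have hdi : decRun l (m+1) = decRun l m + 1 := by rw [decRun, if_pos hgt]
      have hai : incRun l (m+1) = 0 := by rw [incRun, if_neg (by omega)]
      have e1 : m + 1 - 1 = m := by omega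
      have hWa : ¬(l.getD (m+1-3) 0 < l.getD (m+1-2) 0 ∧ l.getD (m+1-2) 0 < l.getD (m+1-1) 0 ∧ l.getD (m+1-1) 0 < l.getD (m+1) 0) := by
        rw [e1]; rintro ⟨-, -, hx⟩; omega
      by_cases hbuy : 3 ≤ decRun l m + 1
      · have hWin : l.getD (m+1-3) 0 > l.getD (m+1-2) 0 ∧ l.getD (m+1-2) 0 > l.getD (m+1-1) 0 ∧ l.getD (m+1-1) 0 > l.getD (m+1) 0 := by
          have := (hd.mp (by omega : 3 ≤ decRun l (m+1)))
          exact ⟨this.2.1, this.2.2.1, this.2.2.2⟩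
        rcases hEv with hEv | ⟨hlt3, _⟩
        · rw [hEv]
          simp only [SungAltEventStep, if_pos hWin, List.foldl_append,
            List.foldl_cons, List.foldl_nil]
          simp only [SungStep, SungAltTrade, Nat.add_sub_cancel, if_pos hgt,
            if_pos hbuy, if_neg (by omega : ¬ (3:Int) ≤ 0), hai, hdi]
          simp
        · -- m+1 < 3 but decRun l m + 1 ≥ 3 forces decRun l m ≥ 2 ≤ m: contradiction
          omega
      · have hW : ¬(l.getD (m+1-3) 0 > l.getD (m+1-2) 0 ∧ l.getD (m+1-2) 0 > l.getD (m+1-1) 0 ∧ l.getD (m+1-1) 0 > l.getD (m+1) 0) := by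
          intro hx
          rcases Nat.lt_or_ge (m+1) 3 with h3 | h3
          · have e : m + 1 - 3 = m + 1 - 2 := by omega
            rw [e] at hx
            exact absurd hx.1 (lt_irrefl _)
          · rw [e1] at hx
            exact hbuy (by rw [← hdi]; exact hd.mpr ⟨h3, hx⟩)
        rcases hEv with hEv | ⟨hlt3, hEv⟩ <;>
        · rw [hEv]
          first
          | (simp only [SungAltEventStep, if_neg hW, if_neg hWa]
             simp only [SungStep, Nat.add_sub_cancel, if_pos hgt,
               if_neg hbuy, if_neg (by omega : ¬ (3:Int) ≤ 0), hai, hdi])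
          | (simp only [SungStep, Nat.add_sub_cancel, if_pos hgt,
               if_neg hbuy, if_neg (by omega : ¬ (3:Int) ≤ 0), hai, hdi])

-- ===== VERDICT (by name: the statement is the Claim_ definition above) =====
theorem Sung_spec : Claim_equal_Sung := by
  intro M l _ _
  show Sung M l = Sung_alt M l
  have h : l.length - 1 - 2 = l.length - 3 := by omega
  simp only [Sung, Sung_alt]
  rw [loop_inv, h]
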